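-- pv_equiv track=rewrite | github.com/FTDfangge/leetcode | competetion/leetcode_cup/CUP_1.py | supplyWagon
-- ===== SOURCE A (Python) =====
-- from typing import List
--
-- def supplyWagon(supplies: List[int]) -> List[int]:
--     def merge():
--         sum_list = []
--         for i in range(1, supplies.__len__()):
--             sum_list.append(supplies[i - 1] + supplies[i])
--         min_idx = 0
--         min_val = sum_list[0]
--         idx = 0
--         while idx < sum_list.__len__():
--             if sum_list[idx] < min_val:
--                 min_val = sum_list[idx]
--                 min_idx = idx
--             idx += 1
--         supplies[min_idx:min_idx + 2] = [min_val]
--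
--     length = supplies.__len__()
--     target = length // 2
--     while length > target:
--         merge()
--         length = supplies.__len__()
--     return supplies
-- ===== SOURCE B (Python) =====
-- from typing import List
--
-- def _insort(agenda, e):
--     i = 0
--     while i < len(agenda) and agenda[i] < e:
--         i += 1
--     agenda.insert(i, e)
--
-- def supplyWagon(supplies: List[int]) -> List[int]:
--     # event-driven: sorted agenda of (sum, left, right) over stable positions,
--     # incrementally repaired after each merge; no rescan of the whole list
--     n = len(supplies)
--     val = list(supplies)
--     alive = [True] * n
--     agenda = sorted((val[i] + val[i + 1], i, i + 1) for i in range(n - 1))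
--     for _ in range(n - n // 2):
--         s, p, q = agenda.pop(0)
--         val[p] = s
--         alive[q] = False
--         left = None
--         right = None
--         rest = []
--         for e in agenda:
--             if e[2] == p:
--                 left = e[1]
--             elif e[1] == q:
--                 right = e[2]
--             else:
--                 rest.append(e)
--         agenda = rest
--         if left is not None:
--             _insort(agenda, (val[left] + val[p], left, p))
--         if right is not None:
--             _insort(agenda, (val[p] + val[right], p, right))
--     return [v for v, a in zip(val, alive) if a]
-- ===== Notes on version B (the rewrite author's own statement) =====
-- stated objective: alternative
-- what changed: Replaces A's per-merge full recomputation (rebuild the whole adjacent-sum list, rescan it for the minimum, slice-assign) by an event-driven simulation: a value/alive store over stable positions plus a sorted agenda of (sum, left, right) candidates; each merge pops the agenda head and repairs only the two neighbouring candidates (one filter pass plus a sorted insert) instead of recomputing all sums.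
import Mathlib
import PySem

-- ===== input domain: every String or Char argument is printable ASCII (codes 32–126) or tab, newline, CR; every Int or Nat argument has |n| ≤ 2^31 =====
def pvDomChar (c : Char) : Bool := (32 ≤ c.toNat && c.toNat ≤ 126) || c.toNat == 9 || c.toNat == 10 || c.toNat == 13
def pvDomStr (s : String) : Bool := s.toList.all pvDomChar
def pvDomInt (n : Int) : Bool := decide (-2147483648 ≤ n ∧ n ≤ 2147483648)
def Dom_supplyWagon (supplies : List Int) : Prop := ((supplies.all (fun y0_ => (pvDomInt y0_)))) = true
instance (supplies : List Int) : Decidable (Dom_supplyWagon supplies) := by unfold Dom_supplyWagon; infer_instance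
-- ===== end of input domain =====

-- B replaces A's per-merge full recomputation (rebuild the adjacent-sum list, rescan for the
-- minimum, slice-assign) by an event-driven sorted agenda of (sum, left, right) candidates over
-- stable positions, repaired incrementally after each merge (a different algorithm, same
-- asymptotic cost). Equivalence is about the RETURN value only (A mutates its argument in
-- place, B does not).

abbrev pvT : Type := Int × Int × Int

-- ===== PORT A =====
-- merge(): builds sum_list, forward while-scan with <, then supplies[mi:mi+2] = [mv]
def pvMergeA (s : List Int) : List Int :=
  let sum_list : List Int :=
    (PySem.List.pyRange 1 (s.length : Int) 1).foldl
      (fun acc i => acc ++ [PySem.List.pyGetD s (i - 1) 0 + PySem.List.pyGetD s i 0]) []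
  -- min_idx = 0; min_val = sum_list[0]  (Python raises IndexError when sum_list = []; outside Pre_)
  let st :=
    (PySem.List.pyRange 0 (sum_list.length : Int) 1).foldl
      (fun (st : Int × Int) idx =>
        if PySem.List.pyGetD sum_list idx 0 < st.2 then (idx, PySem.List.pyGetD sum_list idx 0) else st)
      (0, PySem.List.pyGetD sum_list 0 0)
  PySem.List.slice s none (some st.1) ++ [st.2] ++ PySem.List.slice s (some (st.1 + 2)) none

-- while length > target: merge(); length = len(supplies)   (fuel = initial length bounds the iterations)
def pvLoopA : Nat → Int → List Int → List Int
  | 0, _, s => s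
  | f + 1, target, s => if (s.length : Int) > target then pvLoopA f target (pvMergeA s) else s

def supplyWagon (supplies : List Int) : List Int :=
  pvLoopA supplies.length (PySem.Int.floordiv (supplies.length : Int) 2) supplies

-- ===== PORT B =====
-- _insort: linear scan for the insertion point under Python's tuple order, then insert
def pvLtT (x y : pvT) : Bool :=
  decide (x.1 < y.1) ||
    (decide (x.1 = y.1) &&
      (decide (x.2.1 < y.2.1) || (decide (x.2.1 = y.2.1) && decide (x.2.2 < y.2.2))))

def pvInsort (ys : List pvT) (e : pvT) : List pvT :=
  match ys with
  | [] => [e]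
  | x :: t => if pvLtT x e then x :: pvInsort t e else e :: x :: t

-- one merge event: pop the agenda head, update val/alive, scan once for the two
-- neighbouring candidates to replace, reinsert their updated versions
def pvStepB : List Int × List Bool × List pvT → List Int × List Bool × List pvT
  | (v, al, []) => (v, al, [])   -- Python raises IndexError on pop from an empty agenda; unreachable inside Pre_
  | (v, al, (s, p, q) :: ag) =>
    let val := v.set p.toNat s
    let alive := al.set q.toNat false
    let scan := ag.foldl
      (fun (acc : Option Int × Option Int × List pvT) e =>
        if e.2.2 = p then (some e.2.1, acc.2.1, acc.2.2)
        else if e.2.1 = q then (acc.1, some e.2.2, acc.2.2)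
        else (acc.1, acc.2.1, acc.2.2 ++ [e]))
      ((none : Option Int), (none : Option Int), ([] : List pvT))
    let ag1 := match scan.1 with
      | some l => pvInsort scan.2.2 (PySem.List.pyGetD val l 0 + PySem.List.pyGetD val p 0, l, p)
      | none => scan.2.2
    let ag2 := match scan.2.1 with
      | some r => pvInsort ag1 (PySem.List.pyGetD val p 0 + PySem.List.pyGetD val r 0, p, r)
      | none => ag1
    (val, alive, ag2)

def supplyWagon_alt (supplies : List Int) : List Int :=
  let n := supplies.length
  let ents := (List.range (n - 1)).map
    (fun i => ((supplies.getD i 0 + supplies.getD (i + 1) 0, (i : Int), (i : Int) + 1) : pvT))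
  -- Python sorts the tuples lexicographically; the left components are pairwise distinct, so the
  -- tuple order is the (sum, left) order: sorted2 with those two keys
  let agenda := PySem.List.sorted2 ents (fun e => e.1) (fun e => e.2.1)
  let st := (List.range (n - n / 2)).foldl (fun st _ => pvStepB st) (supplies, List.replicate n true, agenda)
  ((st.1.zip st.2.1).filter (fun x => x.2)).map (fun x => x.1)

-- ===== PRECONDITION & SPEC =====
-- Pre_ excludes exactly the singleton list, on which A raises IndexError (sum_list is empty);
-- B also raises there (pop from an empty agenda).
def Pre_supplyWagon (supplies : List Int) : Prop := supplies.length ≠ 1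
instance (supplies : List Int) : Decidable (Pre_supplyWagon supplies) := by
  unfold Pre_supplyWagon; infer_instance

def pvWitness_supplyWagon : List Int := ([1, 2, 3] : List Int)

def Spec_supplyWagon (supplies : List Int) (out : List Int) : Prop := out = supplyWagon_alt supplies
instance (supplies : List Int) (out : List Int) : Decidable (Spec_supplyWagon supplies out) := by
  unfold Spec_supplyWagon; infer_instance

-- ===== CLAIM (what is proved, stated in full; the proofs are below) =====
def Claim_equal_supplyWagon : Prop := ∀ (supplies : List Int), Dom_supplyWagon supplies → Pre_supplyWagon supplies → Spec_supplyWagon supplies (supplyWagon supplies)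

-- ===== LEMMAS AND PROOFS =====

-- reference: (value, index) of the FIRST minimal element (value for [] is junk, never used)
def pvFam : List Int → Int × Int
  | [] => (0, 0)
  | x :: t => if t = [] ∨ x ≤ (pvFam t).1 then (x, 0) else ((pvFam t).1, (pvFam t).2 + 1)

-- reference adjacent-sum list
def pvQ (s : List Int) : List Int :=
  (List.range (s.length - 1)).map (fun k => s.getD k 0 + s.getD (k + 1) 0)

-- the merged list both programs produce, given (value, index) of the chosen pair
def pvRes (s : List Int) (p : Int × Int) : List Int :=
  PySem.List.slice s none (some p.2) ++ [p.1] ++ PySem.List.slice s (some (p.2 + 2)) none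

-- abstract view of B's state
def pvKLt (x y : pvT) : Prop := x.1 < y.1 ∨ (x.1 = y.1 ∧ x.2.1 < y.2.1)

def pvAliveIdx (alive : List Bool) : List Nat :=
  (List.range alive.length).filter (fun i => alive.getD i false)

def pvZipAdj (l : List Nat) : List (Nat × Nat) := l.zip l.tail

def pvMapS (val : List Int) (ps : List (Nat × Nat)) : List pvT :=
  ps.map (fun ab => (val.getD ab.1 0 + val.getD ab.2 0, (ab.1 : Int), (ab.2 : Int)))

def pvAdj (val : List Int) (alive : List Bool) : List pvT :=
  pvMapS val (pvZipAdj (pvAliveIdx alive))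

def pvCur (val : List Int) (alive : List Bool) : List Int :=
  (pvAliveIdx alive).map (fun i => val.getD i 0)

def pvInv (val : List Int) (alive : List Bool) (ag : List pvT) : Prop :=
  alive.length = val.length ∧ ag.Perm (pvAdj val alive) ∧ ag.Pairwise pvKLt

-- ---------- A-side lemmas ----------

theorem pvQ_length (s : List Int) : (pvQ s).length = s.length - 1 := by
  simp [pvQ]

theorem pvFam_bounds (q : List Int) (h : q ≠ []) :
    0 ≤ (pvFam q).2 ∧ (pvFam q).2 < (q.length : Int) := by
  induction q with
  | nil => exact absurd rfl h
  | cons x t ih =>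
    by_cases ht : t = []
    · subst ht; simp [pvFam]
    · have := ih ht
      simp only [pvFam]
      split_ifs with hc
      · simp
      · simp only [List.length_cons]
        push_cast
        omega

theorem pvFam_eq_head (x : Int) (t : List Int) (h : ¬ (pvFam (x :: t)).1 < x) :
    pvFam (x :: t) = (x, 0) := by
  simp only [pvFam] at h ⊢
  split_ifs at h ⊢ with hc
  · rfl
  · push_neg at hc
    exact absurd hc.2 h

theorem pvSumListA (s : List Int) :
    (PySem.List.pyRange 1 (s.length : Int) 1).foldl
      (fun acc i => acc ++ [PySem.List.pyGetD s (i - 1) 0 + PySem.List.pyGetD s i 0]) []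
    = pvQ s := by
  rw [PySem.List.foldl_append_singleton_eq_map, PySem.List.pyRange_one, List.map_map]
  have hlen : ((s.length : Int) - 1).toNat = s.length - 1 := by omega
  rw [hlen]
  unfold pvQ
  apply List.map_congr_left
  intro k _
  have h1 : (1 : Int) + (k : Int) - 1 = (k : Int) := by ring
  have h2 : (1 : Int) + (k : Int) = ((k + 1 : Nat) : Int) := by push_cast; ring
  simp only [Function.comp_apply]
  rw [h1, h2, PySem.List.pyGetD_natCast, PySem.List.pyGetD_natCast]

theorem pvScanA (q : List Int) (n : Nat) : ∀ (j : Nat) (st : Int × Int), q.length = j + n →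
    (PySem.List.pyRange (j : Int) (q.length : Int) 1).foldl
      (fun (st : Int × Int) idx =>
        if PySem.List.pyGetD q idx 0 < st.2 then (idx, PySem.List.pyGetD q idx 0) else st) st
    = if n ≠ 0 ∧ (pvFam (q.drop j)).1 < st.2
      then ((j : Int) + (pvFam (q.drop j)).2, (pvFam (q.drop j)).1) else st := by
  induction n with
  | zero =>
    intro j st hlen
    rw [PySem.List.pyRange_one_eq_nil (by omega)]
    simp
  | succ n ih =>
    intro j st hlen
    have hj : j < q.length := by omega
    rw [PySem.List.pyRange_one_cons (by exact_mod_cast hj)]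
    have hcast : ((j : Int) + 1) = ((j + 1 : Nat) : Int) := by push_cast; ring
    rw [List.foldl_cons, hcast, ih (j + 1) _ (by omega)]
    have hget : PySem.List.pyGetD q (j : Int) 0 = q[j] := by
      rw [PySem.List.pyGetD_natCast, List.getD_eq_getElem q 0 hj]
    have hdrop : q.drop j = q[j] :: q.drop (j + 1) := List.drop_eq_getElem_cons hj
    have hdroplen : (q.drop (j + 1)).length = n := by simp; omega
    rw [hget, hdrop]
    by_cases hn : n = 0
    · have hnil : q.drop (j + 1) = [] := by
        rw [← List.length_eq_zero_iff, hdroplen, hn]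
      rw [hnil]
      simp only [pvFam, if_pos (Or.inl rfl)]
      split_ifs with h1 h2 h3 <;> simp_all <;> omega
    · have hnnil : q.drop (j + 1) ≠ [] := by
        intro hc; rw [hc] at hdroplen; simp at hdroplen; omega
      have hfam : pvFam (q[j] :: q.drop (j + 1))
          = if q[j] ≤ (pvFam (q.drop (j + 1))).1 then (q[j], 0)
            else ((pvFam (q.drop (j + 1))).1, (pvFam (q.drop (j + 1))).2 + 1) := by
        simp only [pvFam]
        split_ifs with h1 h2 h3 <;> first | rfl | (exfalso; tauto)
      rw [hfam]
      split_ifs with h1 h2 h3 h4 h5 h6 h7 <;>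
        simp_all [Prod.ext_iff] <;> omega

theorem pvQ_ne_nil (s : List Int) (h : 2 ≤ s.length) : pvQ s ≠ [] := by
  intro hnil
  have hl := pvQ_length s
  rw [hnil] at hl
  simp at hl
  omega

theorem pvMergeA_eq_res (s : List Int) (h : 2 ≤ s.length) :
    pvMergeA s = pvRes s (pvFam (pvQ s)) := by
  obtain ⟨x, t, hxt⟩ := List.exists_cons_of_ne_nil (pvQ_ne_nil s h)
  simp only [pvMergeA]
  rw [pvSumListA]
  have hscan := pvScanA (pvQ s) (pvQ s).length 0 (0, PySem.List.pyGetD (pvQ s) 0 0) (by omega)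
  simp only [Nat.cast_zero, List.drop_zero, zero_add] at hscan
  rw [hscan, hxt]
  have hx0 : PySem.List.pyGetD (x :: t) 0 0 = x := by
    simp [PySem.List.pyGetD_zero]
  rw [hx0]
  by_cases hlt : (pvFam (x :: t)).1 < x
  · rw [if_pos ⟨by simp, hlt⟩]
    simp [pvRes]
  · rw [if_neg (by simp [hlt])]
    rw [pvFam_eq_head x t hlt]
    simp [pvRes]

theorem pvResFam_length (s : List Int) (h : 2 ≤ s.length) :
    (pvRes s (pvFam (pvQ s))).length = s.length - 1 := by
  obtain ⟨hb0, hb1⟩ := pvFam_bounds (pvQ s) (pvQ_ne_nil s h)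
  rw [pvQ_length s] at hb1
  set p := pvFam (pvQ s) with hp
  obtain ⟨k, hK⟩ : ∃ k : Nat, p.2 = (k : Int) := ⟨p.2.toNat, by omega⟩
  have hkb : k ≤ s.length - 2 := by omega
  unfold pvRes
  rw [hK]
  have hk2 : (k : Int) + 2 = ((k + 2 : Nat) : Int) := by push_cast; ring
  rw [hk2, PySem.List.slice_to_natCast, PySem.List.slice_from_natCast]
  simp only [List.length_append, List.length_take, List.length_drop, List.length_cons,
    List.length_nil]
  omega

theorem pvFoldRangeSucc {α : Type} (f : α → α) (j : Nat) (s : α) :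
    (List.range (j + 1)).foldl (fun t _ => f t) s
    = (List.range j).foldl (fun t _ => f t) (f s) := by
  rw [List.range_succ_eq_map]
  simp [List.foldl_map]

-- ---------- B-side lemmas ----------

theorem pvFam_fst_mem (l : List Int) (h : l ≠ []) : (pvFam l).1 ∈ l := by
  induction l with
  | nil => exact absurd rfl h
  | cons x t ih =>
    simp only [pvFam]
    split_ifs with hc
    · exact List.mem_cons_self
    · have ht : t ≠ [] := by intro hn; exact hc (Or.inl hn)
      exact List.mem_cons_of_mem x (ih ht)

theorem pvFam_eq_of (l : List Int) (j : Nat) (hj : j < l.length)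
    (hmin : ∀ k, (hk : k < l.length) → l[j] ≤ l[k])
    (hfst : ∀ k, (hk : k < j) → l[j] < l[k]) :
    pvFam l = (l[j], (j : Int)) := by
  induction l generalizing j with
  | nil => simp at hj
  | cons x t ih =>
    cases j with
    | zero =>
      simp only [List.getElem_cons_zero] at *
      simp only [pvFam, Nat.cast_zero]
      rw [if_pos]
      by_cases ht : t = []
      · exact Or.inl ht
      · right
        obtain ⟨k, hk, hke⟩ := List.mem_iff_getElem.1 (pvFam_fst_mem t ht)
        rw [← hke]
        have := hmin (k + 1) (by simpa using hk)
        simpa using this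
    | succ j' =>
      have hj' : j' < t.length := by simpa using hj
      have ht : t ≠ [] := by intro hn; subst hn; simp at hj'
      have hfam : pvFam t = (t[j'], (j' : Int)) := by
        apply ih j' hj'
        · intro k hk
          have := hmin (k + 1) (by simpa using hk)
          simpa using this
        · intro k hk
          have := hfst (k + 1) (by omega)
          simpa using this
      have hlt : (pvFam t).1 < x := by
        rw [hfam]
        have := hfst 0 (by omega)
        simpa using this
      simp only [pvFam]
      rw [if_neg (by push_neg; exact ⟨ht, by omega⟩)]
      rw [hfam]
      simp only [List.getElem_cons_succ]
      constructor <;> push_cast <;> ring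

theorem pvKLt_trans {a b c : pvT} (h1 : pvKLt a b) (h2 : pvKLt b c) : pvKLt a c := by
  unfold pvKLt at *; omega

theorem pvLtT_true_iff {x y : pvT} (h : x.2.1 ≠ y.2.1) : pvLtT x y = true ↔ pvKLt x y := by
  simp only [pvLtT, pvKLt, Bool.or_eq_true, Bool.and_eq_true, decide_eq_true_eq]
  omega

theorem pvLtT_false_iff {x y : pvT} (h : x.2.1 ≠ y.2.1) : pvLtT x y = false ↔ pvKLt y x := by
  rw [Bool.eq_false_iff, Ne, pvLtT_true_iff h]
  unfold pvKLt
  omega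

theorem pvInsort_perm (ys : List pvT) (e : pvT) : (pvInsort ys e).Perm (e :: ys) := by
  induction ys with
  | nil => simp [pvInsort]
  | cons x t ih =>
    simp only [pvInsort]
    split_ifs with hc
    · exact (ih.cons x).trans (List.Perm.swap e x t)
    · exact List.Perm.refl _

theorem pvInsort_pairwise (ys : List pvT) (e : pvT) (h : ys.Pairwise pvKLt)
    (hd : ∀ y ∈ ys, y.2.1 ≠ e.2.1) : (pvInsort ys e).Pairwise pvKLt := by
  induction ys with
  | nil => simp [pvInsort]
  | cons x t ih =>
    rw [List.pairwise_cons] at h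
    obtain ⟨hx, ht⟩ := h
    simp only [pvInsort]
    split_ifs with hc
    · rw [List.pairwise_cons]
      refine ⟨?_, ih ht (fun y hy => hd y (List.mem_cons_of_mem x hy))⟩
      intro y hy
      rcases List.mem_cons.1 ((pvInsort_perm t e).mem_iff.1 hy) with hy | hy
      · subst hy
        exact (pvLtT_true_iff (hd x List.mem_cons_self)).1 hc
      · exact hx y hy
    · have hce : pvKLt e x :=
        (pvLtT_false_iff (hd x List.mem_cons_self)).1 (by simpa using hc)
      rw [List.pairwise_cons]
      refine ⟨?_, List.Pairwise.cons hx ht⟩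
      intro y hy
      rcases List.mem_cons.1 hy with hy | hy
      · subst hy; exact hce
      · exact pvKLt_trans hce (hx y hy)

def pvBef (a b : pvT) : Bool :=
  decide (a.1 < b.1) || (!decide (b.1 < a.1) && decide (a.2.1 < b.2.1))

theorem pvSorted2_eq (xs : List pvT) :
    PySem.List.sorted2 xs (fun e => e.1) (fun e => e.2.1)
      = xs.foldl (fun acc x => PySem.List.insertBy pvBef x acc) [] := by
  rfl

theorem pvBef_true_iff (x y : pvT) : pvBef x y = true ↔ pvKLt x y := by
  simp only [pvBef, pvKLt, Bool.or_eq_true, Bool.and_eq_true, Bool.not_eq_eq_eq_not,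
    Bool.not_true, decide_eq_true_eq, decide_eq_false_iff_not]
  omega

theorem pvBef_false_iff {x y : pvT} (h : x.2.1 ≠ y.2.1) : pvBef x y = false ↔ pvKLt y x := by
  rw [Bool.eq_false_iff, Ne, pvBef_true_iff]
  unfold pvKLt
  omega

theorem pvZipAdj_cons₂ (a b : Nat) (l : List Nat) :
    pvZipAdj (a :: b :: l) = (a, b) :: pvZipAdj (b :: l) := rfl

theorem pvInsertBy_perm (e : pvT) (ys : List pvT) :
    (PySem.List.insertBy pvBef e ys).Perm (e :: ys) := by
  induction ys with
  | nil => simp [PySem.List.insertBy]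
  | cons x t ih =>
    simp only [PySem.List.insertBy]
    split_ifs with hc
    · exact List.Perm.refl _
    · exact (ih.cons x).trans (List.Perm.swap e x t)

theorem pvInsertBy_pairwise (e : pvT) (ys : List pvT) (h : ys.Pairwise pvKLt)
    (hd : ∀ y ∈ ys, y.2.1 ≠ e.2.1) : (PySem.List.insertBy pvBef e ys).Pairwise pvKLt := by
  induction ys with
  | nil => simp [PySem.List.insertBy]
  | cons x t ih =>
    rw [List.pairwise_cons] at h
    obtain ⟨hx, ht⟩ := h
    simp only [PySem.List.insertBy]
    split_ifs with hc
    · have hce : pvKLt e x := (pvBef_true_iff e x).1 hc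
      rw [List.pairwise_cons]
      refine ⟨?_, List.Pairwise.cons hx ht⟩
      intro y hy
      rcases List.mem_cons.1 hy with hy | hy
      · subst hy; exact hce
      · exact pvKLt_trans hce (hx y hy)
    · rw [List.pairwise_cons]
      refine ⟨?_, ih ht (fun y hy => hd y (List.mem_cons_of_mem x hy))⟩
      intro y hy
      rcases List.mem_cons.1 ((pvInsertBy_perm e t).mem_iff.1 hy) with hy | hy
      · subst hy
        exact (pvBef_false_iff (hd x List.mem_cons_self).symm).1 (by simpa using hc)
      · exact hx y hy

theorem pvSorted2_pairwise (xs : List pvT) (h : xs.Pairwise (fun a b => a.2.1 ≠ b.2.1)) :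
    (PySem.List.sorted2 xs (fun e => e.1) (fun e => e.2.1)).Pairwise pvKLt := by
  rw [pvSorted2_eq]
  suffices H : ∀ (xs acc : List pvT), acc.Pairwise pvKLt →
      (∀ a ∈ acc, ∀ b ∈ xs, a.2.1 ≠ b.2.1) →
      xs.Pairwise (fun a b => a.2.1 ≠ b.2.1) →
      (xs.foldl (fun acc x => PySem.List.insertBy pvBef x acc) acc).Pairwise pvKLt by
    exact H xs [] (by simp) (by simp) h
  intro xs
  induction xs with
  | nil => intro acc hacc _ _; exact hacc
  | cons x t ih =>
    intro acc hacc hmem hxs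
    rw [List.pairwise_cons] at hxs
    obtain ⟨hxh, hxt⟩ := hxs
    simp only [List.foldl_cons]
    apply ih
    · exact pvInsertBy_pairwise x acc hacc (fun y hy => hmem y hy x List.mem_cons_self)
    · intro a ha b hb
      rcases List.mem_cons.1 ((pvInsertBy_perm x acc).mem_iff.1 ha) with ha | ha
      · subst ha; exact hxh b hb
      · exact hmem a ha b (List.mem_cons_of_mem x hb)
    · exact hxt

-- scan-loop characterisations
theorem pvScan3 (p q : Int) (L : List pvT) (o1 o2 : Option Int) (r : List pvT) :
    (L.foldl (fun (acc : Option Int × Option Int × List pvT) e =>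
        if e.2.2 = p then (some e.2.1, acc.2.1, acc.2.2)
        else if e.2.1 = q then (acc.1, some e.2.2, acc.2.2)
        else (acc.1, acc.2.1, acc.2.2 ++ [e])) (o1, o2, r)).2.2
    = r ++ L.filter (fun e => !decide (e.2.2 = p) && !decide (e.2.1 = q)) := by
  induction L generalizing o1 o2 r with
  | nil => simp
  | cons e L ih =>
    simp only [List.foldl_cons, List.filter_cons]
    by_cases h1 : e.2.2 = p
    · simp [h1, ih]
    · by_cases h2 : e.2.1 = q
      · simp [h1, h2, ih]
      · simp [h1, h2, ih]

theorem pvScan1 (p q : Int) (L : List pvT) (o1 o2 : Option Int) (r : List pvT) :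
    (L.foldl (fun (acc : Option Int × Option Int × List pvT) e =>
        if e.2.2 = p then (some e.2.1, acc.2.1, acc.2.2)
        else if e.2.1 = q then (acc.1, some e.2.2, acc.2.2)
        else (acc.1, acc.2.1, acc.2.2 ++ [e])) (o1, o2, r)).1
    = (L.filter (fun e => decide (e.2.2 = p))).foldl (fun _ e => some e.2.1) o1 := by
  induction L generalizing o1 o2 r with
  | nil => simp
  | cons e L ih =>
    simp only [List.foldl_cons, List.filter_cons]
    by_cases h1 : e.2.2 = p
    · simp [h1, ih]
    · by_cases h2 : e.2.1 = q
      · simp [h1, h2, ih]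
      · simp [h1, h2, ih]

theorem pvScan2 (p q : Int) (L : List pvT) (o1 o2 : Option Int) (r : List pvT) :
    (L.foldl (fun (acc : Option Int × Option Int × List pvT) e =>
        if e.2.2 = p then (some e.2.1, acc.2.1, acc.2.2)
        else if e.2.1 = q then (acc.1, some e.2.2, acc.2.2)
        else (acc.1, acc.2.1, acc.2.2 ++ [e])) (o1, o2, r)).2.1
    = (L.filter (fun e => !decide (e.2.2 = p) && decide (e.2.1 = q))).foldl
        (fun _ e => some e.2.2) o2 := by
  induction L generalizing o1 o2 r with
  | nil => simp
  | cons e L ih =>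
    simp only [List.foldl_cons, List.filter_cons]
    by_cases h1 : e.2.2 = p
    · simp [h1, ih]
    · by_cases h2 : e.2.1 = q
      · simp [h1, h2, ih]
      · simp [h1, h2, ih]

-- zip-adjacency lemmas
theorem pvZipAdj_length (l : List Nat) : (pvZipAdj l).length = l.length - 1 := by
  simp only [pvZipAdj, List.length_zip, List.length_tail]
  omega

theorem pvZipAdj_getElem (l : List Nat) (t : Nat) (h : t + 1 < l.length) :
    (pvZipAdj l)[t]'(by rw [pvZipAdj_length]; omega) = (l[t], l[t + 1]) := by
  simp [pvZipAdj, List.getElem_zip, List.getElem_tail]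

theorem pvZipAdj_append (X : List Nat) (y : Nat) (Z : List Nat) :
    pvZipAdj (X ++ y :: Z) = pvZipAdj (X ++ [y]) ++ pvZipAdj (y :: Z) := by
  induction X with
  | nil => simp [pvZipAdj]
  | cons x X ih =>
    cases X with
    | nil => simp [pvZipAdj]
    | cons x' X' =>
      simp only [List.cons_append]
      rw [pvZipAdj_cons₂, pvZipAdj_cons₂]
      rw [← List.cons_append, ih]
      simp

theorem pvZipAdj_snoc (X : List Nat) (x y : Nat) :
    pvZipAdj (X ++ [x] ++ [y]) = pvZipAdj (X ++ [x]) ++ [(x, y)] := by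
  simp only [List.append_assoc, List.singleton_append]
  rw [pvZipAdj_append X x [y]]
  simp [pvZipAdj]

-- aliveIdx lemmas
theorem pvAliveIdx_pairwise (alive : List Bool) : (pvAliveIdx alive).Pairwise (· < ·) := by
  exact (List.pairwise_lt_range).filter _

theorem pvAliveIdx_nodup (alive : List Bool) : (pvAliveIdx alive).Nodup := by
  exact (pvAliveIdx_pairwise alive).imp ne_of_lt

theorem pvAliveIdx_mem (alive : List Bool) (i : Nat) :
    i ∈ pvAliveIdx alive ↔ i < alive.length ∧ alive.getD i false = true := by
  simp [pvAliveIdx, List.mem_filter, List.mem_range]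

theorem pvAliveIdx_set_false (alive : List Bool) (i : Nat) (hi : i < alive.length) :
    pvAliveIdx (alive.set i false) = (pvAliveIdx alive).filter (fun x => !decide (x = i)) := by
  unfold pvAliveIdx
  rw [List.length_set, List.filter_filter]
  apply List.filter_congr
  intro k hk
  rw [List.mem_range] at hk
  by_cases hki : k = i
  · subst hki
    rw [List.getD_eq_getElem?_getD, List.getElem?_set_self hi]
    simp [hi]
  · rw [List.getD_eq_getElem?_getD, List.getElem?_set_ne (by omega)]
    simp [hki, List.getD_eq_getElem?_getD]

theorem pvGetD_set_self (val : List Int) (i : Nat) (v : Int) (h : i < val.length) :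
    (val.set i v).getD i 0 = v := by
  rw [List.getD_eq_getElem?_getD, List.getElem?_set_self h]
  simp

theorem pvGetD_set_ne (val : List Int) (i j : Nat) (v : Int) (h : j ≠ i) :
    (val.set i v).getD j 0 = val.getD j 0 := by
  rw [List.getD_eq_getElem?_getD, List.getElem?_set_ne (by omega), ← List.getD_eq_getElem?_getD]

theorem pvAliveIdx_cons (b : Bool) (t : List Bool) :
    pvAliveIdx (b :: t) = (if b then [0] else []) ++ (pvAliveIdx t).map (· + 1) := by
  unfold pvAliveIdx
  simp only [List.length_cons, List.range_succ_eq_map]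
  rw [List.filter_cons]
  simp only [List.getD_cons_zero]
  rw [List.filter_map]
  have : ((fun i => (b :: t).getD i false) ∘ Nat.succ) = (fun i => t.getD i false) := by
    funext k
    simp
  rw [this]
  cases b <;> simp

theorem pvAliveIdx_replicate (n : Nat) :
    pvAliveIdx (List.replicate n true) = List.range n := by
  unfold pvAliveIdx
  rw [List.length_replicate]
  apply List.filter_eq_self.2
  intro i hi
  rw [List.mem_range] at hi
  rw [List.getD_eq_getElem?_getD, List.getElem?_replicate]
  simp [hi]

theorem pvCur_zipfilter (val : List Int) (alive : List Bool) (h : alive.length = val.length) :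
    ((val.zip alive).filter (fun x => x.2)).map (fun x => x.1) = pvCur val alive := by
  induction alive generalizing val with
  | nil =>
    have : val = [] := by
      cases val
      · rfl
      · simp at h
    subst this
    simp [pvCur, pvAliveIdx]
  | cons b t ih =>
    cases val with
    | nil => simp at h
    | cons v vs =>
      have hlen : t.length = vs.length := by simpa using h
      have hmap : ((pvAliveIdx t).map (· + 1)).map (fun i => (v :: vs).getD i 0)
          = pvCur vs t := by
        rw [List.map_map]
        unfold pvCur
        apply List.map_congr_left
        intro k _
        simp
      unfold pvCur
      rw [pvAliveIdx_cons, List.map_append, hmap, ← ih vs hlen]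
      cases b
      · simp
      · simp

theorem pvZipAdj_mem_getElem {l : List Nat} {ab : Nat × Nat} (h : ab ∈ pvZipAdj l) :
    ∃ t, ∃ (ht : t + 1 < l.length), ab = (l[t]'(by omega), l[t + 1]'ht) := by
  obtain ⟨t, htl, he⟩ := List.mem_iff_getElem.1 h
  have ht : t + 1 < l.length := by
    have := pvZipAdj_length l
    omega
  refine ⟨t, ht, ?_⟩
  rw [← he, pvZipAdj_getElem l t ht]

theorem pvZipAdj_mem {l : List Nat} {ab : Nat × Nat} (h : ab ∈ pvZipAdj l) :
    ab.1 ∈ l ∧ ab.2 ∈ l := by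
  obtain ⟨t, ht, rfl⟩ := pvZipAdj_mem_getElem h
  exact ⟨List.getElem_mem _, List.getElem_mem _⟩

theorem pvZipAdj_concat_left_mem {l : List Nat} {a : Nat} {ab : Nat × Nat}
    (h : ab ∈ pvZipAdj (l ++ [a])) : ab.1 ∈ l := by
  obtain ⟨t, ht, rfl⟩ := pvZipAdj_mem_getElem h
  have htl : t < l.length := by simp at ht; omega
  simp only [List.getElem_append_left htl]
  exact List.getElem_mem _

theorem pvMapS_append (val : List Int) (xs ys : List (Nat × Nat)) :
    pvMapS val (xs ++ ys) = pvMapS val xs ++ pvMapS val ys := by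
  simp [pvMapS]

theorem pvMapS_cons (val : List Int) (ab : Nat × Nat) (ys : List (Nat × Nat)) :
    pvMapS val (ab :: ys)
      = (val.getD ab.1 0 + val.getD ab.2 0, (ab.1 : Int), (ab.2 : Int)) :: pvMapS val ys := by
  simp [pvMapS]

theorem pvMapS_congr (val val' : List Int) (ps : List (Nat × Nat))
    (h : ∀ ab ∈ ps, val'.getD ab.1 0 = val.getD ab.1 0 ∧ val'.getD ab.2 0 = val.getD ab.2 0) :
    pvMapS val' ps = pvMapS val ps := by
  apply List.map_congr_left
  intro ab hab
  rw [(h ab hab).1, (h ab hab).2]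

theorem pvMapS_mem {val : List Int} {ps : List (Nat × Nat)} {e : pvT} (h : e ∈ pvMapS val ps) :
    ∃ ab ∈ ps, e = (val.getD ab.1 0 + val.getD ab.2 0, (ab.1 : Int), (ab.2 : Int)) := by
  obtain ⟨ab, hab, he⟩ := List.mem_map.1 h
  exact ⟨ab, hab, he.symm⟩

-- the key single-step simulation
theorem pvStepB_sim (val : List Int) (alive : List Bool) (ag : List pvT)
    (hinv : pvInv val alive ag) (h2 : 2 ≤ (pvCur val alive).length) :
    pvInv (pvStepB (val, alive, ag)).1 (pvStepB (val, alive, ag)).2.1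
      (pvStepB (val, alive, ag)).2.2 ∧
    pvCur (pvStepB (val, alive, ag)).1 (pvStepB (val, alive, ag)).2.1
      = pvRes (pvCur val alive) (pvFam (pvQ (pvCur val alive))) := by
  obtain ⟨hlen, hperm, hpw⟩ := hinv
  have hm2 : 2 ≤ (pvAliveIdx alive).length := by
    have : (pvCur val alive).length = (pvAliveIdx alive).length := by simp [pvCur]
    omega
  have hadjlen : (pvAdj val alive).length = (pvAliveIdx alive).length - 1 := by
    simp [pvAdj, pvMapS, pvZipAdj_length]
  cases ag with
  | nil =>
    exfalso
    have := hperm.length_eq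
    simp at this
    omega
  | cons hd rest =>
  obtain ⟨s, p, q⟩ := hd
  have hhd : (s, p, q) ∈ pvAdj val alive := hperm.subset List.mem_cons_self
  obtain ⟨j, hjlt, hjeq⟩ := List.mem_iff_getElem.1 hhd
  have hj1 : j + 1 < (pvAliveIdx alive).length := by omega
  have hjI : j < (pvAliveIdx alive).length := by omega
  have hadjget : ∀ k (hk : k + 1 < (pvAliveIdx alive).length),
      (pvAdj val alive)[k]'(by rw [hadjlen]; omega)
      = (val.getD ((pvAliveIdx alive)[k]'(by omega)) 0
           + val.getD ((pvAliveIdx alive)[k + 1]'hk) 0,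
         (((pvAliveIdx alive)[k]'(by omega) : Nat) : Int),
         (((pvAliveIdx alive)[k + 1]'hk : Nat) : Int)) := by
    intro k hk
    simp only [pvAdj, pvMapS, List.getElem_map]
    rw [pvZipAdj_getElem (pvAliveIdx alive) k hk]
  have hgd : ∀ k (hk : k < (pvAliveIdx alive).length),
      (pvAliveIdx alive)[k]'hk = (pvAliveIdx alive).getD k 0 :=
    fun k hk => (List.getD_eq_getElem _ _ hk).symm
  set p' := (pvAliveIdx alive).getD j 0 with hp'
  set q' := (pvAliveIdx alive).getD (j + 1) 0 with hq'
  obtain ⟨U, hU⟩ : ∃ x, (pvAliveIdx alive).take j = x := ⟨_, rfl⟩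
  obtain ⟨W, hW⟩ : ∃ x, (pvAliveIdx alive).drop (j + 2) = x := ⟨_, rfl⟩
  have hIdec : pvAliveIdx alive = U ++ p' :: q' :: W := by
    conv_lhs => rw [← List.take_append_drop j (pvAliveIdx alive),
      List.drop_eq_getElem_cons hjI, List.drop_eq_getElem_cons hj1]
    rw [hgd j hjI, hgd (j + 1) hj1, hU, hW]
  have hadjgetD : ∀ k (hk : k + 1 < (pvAliveIdx alive).length),
      (pvAdj val alive)[k]'(by rw [hadjlen]; omega)
      = (val.getD ((pvAliveIdx alive).getD k 0) 0
           + val.getD ((pvAliveIdx alive).getD (k + 1) 0) 0,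
         (((pvAliveIdx alive).getD k 0 : Nat) : Int),
         (((pvAliveIdx alive).getD (k + 1) 0 : Nat) : Int)) := by
    intro k hk
    rw [hadjget k hk, hgd k (by omega), hgd (k + 1) hk]
  rw [hadjgetD j hj1] at hjeq
  simp only [Prod.mk.injEq] at hjeq
  obtain ⟨hs, hp, hq⟩ := hjeq
  subst hp
  subst hq
  -- nodup facts
  have hnd : (pvAliveIdx alive).Nodup := pvAliveIdx_nodup alive
  have hndDec : (U ++ p' :: q' :: W).Nodup := hIdec ▸ hnd
  have hndU : U.Nodup := hndDec.of_append_left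
  have hdisj : ∀ x ∈ U, x ∉ p' :: q' :: W :=
    fun x hx hmem => (List.disjoint_of_nodup_append hndDec) hx hmem
  have hnd2 : (p' :: q' :: W).Nodup := hndDec.of_append_right
  have hpq : p' ≠ q' := by simp [List.nodup_cons] at hnd2; tauto
  have hpW : p' ∉ W := by simp [List.nodup_cons] at hnd2; tauto
  have hqW : q' ∉ W := by simp [List.nodup_cons] at hnd2; tauto
  have hpU : p' ∉ U := fun hx => hdisj p' hx (List.mem_cons_self)
  have hqU : q' ∉ U := fun hx => hdisj q' hx (List.mem_cons_of_mem _ List.mem_cons_self)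
  have hmemI : ∀ x ∈ pvAliveIdx alive, x < alive.length :=
    fun x hx => ((pvAliveIdx_mem alive x).1 hx).1
  have hpl : p' < alive.length := by
    rw [hp', ← hgd j hjI]; exact hmemI _ (List.getElem_mem _)
  have hql : q' < alive.length := by
    rw [hq', ← hgd (j + 1) hj1]; exact hmemI _ (List.getElem_mem _)
  have hmono : ∀ k1 k2, k1 < k2 → k2 < (pvAliveIdx alive).length →
      (pvAliveIdx alive).getD k1 0 < (pvAliveIdx alive).getD k2 0 := by
    intro k1 k2 h12 h2
    rw [← hgd k1 (by omega), ← hgd k2 h2]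
    exact List.pairwise_iff_getElem.1 (pvAliveIdx_pairwise alive) k1 k2 (by omega) h2 h12
  have hndget : ∀ k, k < (pvAliveIdx alive).length → k ≠ j →
      (pvAliveIdx alive).getD k 0 ≠ p' := by
    intro k hk hkj he
    rcases Nat.lt_or_ge k j with h | h
    · exact absurd he (Nat.ne_of_lt (hmono k j h hjI))
    · have h2 : j < k := by omega
      exact absurd he.symm (Nat.ne_of_lt (hmono j k h2 hk))
  -- head of the agenda is KLt-below every other adjacency entry
  have hminKLt : ∀ e ∈ pvAdj val alive, e ≠ (s, (p' : Int), (q' : Int)) →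
      pvKLt (s, (p' : Int), (q' : Int)) e := by
    intro e he hne
    have : e ∈ (s, (p' : Int), (q' : Int)) :: rest := hperm.symm.subset he
    rcases List.mem_cons.1 this with h | h
    · exact absurd h hne
    · exact (List.pairwise_cons.1 hpw).1 e h
  -- pvFam of the current sum list picks (s, j)
  have hcurlen : (pvCur val alive).length = (pvAliveIdx alive).length := by simp [pvCur]
  have hQlen : (pvQ (pvCur val alive)).length = (pvAliveIdx alive).length - 1 := by
    rw [pvQ_length]; omega
  have hQget : ∀ k (hk : k + 1 < (pvAliveIdx alive).length),
      (pvQ (pvCur val alive))[k]'(by rw [hQlen]; omega)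
        = val.getD ((pvAliveIdx alive).getD k 0) 0
          + val.getD ((pvAliveIdx alive).getD (k + 1) 0) 0 := by
    intro k hk
    have h1 : (pvQ (pvCur val alive))[k]'(by rw [hQlen]; omega)
        = (pvCur val alive).getD k 0 + (pvCur val alive).getD (k + 1) 0 := by
      simp [pvQ]
    have h2 : ∀ t, t < (pvAliveIdx alive).length →
        (pvCur val alive).getD t 0 = val.getD ((pvAliveIdx alive).getD t 0) 0 := by
      intro t ht
      rw [List.getD_eq_getElem _ _ (by rw [hcurlen]; omega)]
      simp only [pvCur, List.getElem_map]
      rw [hgd t ht]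
    rw [h1, h2 k (by omega), h2 (k + 1) hk]
  have hfam : pvFam (pvQ (pvCur val alive)) = (s, (j : Int)) := by
    have hv : (pvQ (pvCur val alive))[j]'(by rw [hQlen]; omega) = s := by
      rw [hQget j hj1]; exact hs
    have hres := pvFam_eq_of (pvQ (pvCur val alive)) j (by rw [hQlen]; omega) ?_ ?_
    · rw [hres, hv]
    · intro k hk
      rw [hQlen] at hk
      by_cases hkj : k = j
      · subst hkj; omega
      · have hK := hminKLt ((pvAdj val alive)[k]'(by rw [hadjlen]; omega))
          (List.getElem_mem _) ?_
        · rw [hadjgetD k (by omega)] at hK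
          rw [hv, hQget k (by omega)]
          unfold pvKLt at hK
          dsimp only at hK
          rcases hK with h | ⟨h, _⟩ <;> omega
        · rw [hadjgetD k (by omega)]
          intro hc
          simp only [Prod.mk.injEq] at hc
          exact (hndget k (by omega) hkj) (by exact_mod_cast hc.2.1)
    · intro k hkj
      have hk : k + 1 < (pvAliveIdx alive).length := by omega
      have hK := hminKLt ((pvAdj val alive)[k]'(by rw [hadjlen]; omega))
        (List.getElem_mem _) ?_
      · rw [hadjgetD k hk] at hK
        have hlt : (((pvAliveIdx alive).getD k 0 : Nat) : Int) < ((p' : Nat) : Int) := by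
          exact_mod_cast hmono k j hkj hjI
        rw [hv, hQget k hk]
        unfold pvKLt at hK
        dsimp only at hK
        rcases hK with h | ⟨h, h2⟩ <;> omega
      · rw [hadjgetD k hk]
        intro hc
        simp only [Prod.mk.injEq] at hc
        exact (hndget k (by omega) (by omega)) (by exact_mod_cast hc.2.1)
  -- new value/alive stores
  have hpv : p' < val.length := hlen ▸ hpl
  have hset_p : (val.set p' s).getD p' 0 = s := pvGetD_set_self val p' s hpv
  have hset_ne : ∀ a, a ≠ p' → (val.set p' s).getD a 0 = val.getD a 0 :=
    fun a ha => pvGetD_set_ne val p' a s ha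
  have hs2 : val[p']?.getD 0 + val[q']?.getD 0 = s := by
    rw [← List.getD_eq_getElem?_getD, ← List.getD_eq_getElem?_getD]; exact hs
  have hAlive' : pvAliveIdx (alive.set q' false) = U ++ p' :: W := by
    rw [pvAliveIdx_set_false alive q' hql, hIdec, List.filter_append]
    have h1 : U.filter (fun x => !decide (x = q')) = U :=
      List.filter_eq_self.2 (fun x hx => by
        have hne : x ≠ q' := fun hc => hqU (hc ▸ hx)
        simp [hne])
    have hxW : W.filter (fun x => !decide (x = q')) = W :=
      List.filter_eq_self.2 (fun x hx => by
        have hne : x ≠ q' := fun hc => hqW (hc ▸ hx)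
        simp [hne])
    have h2 : (p' :: q' :: W).filter (fun x => !decide (x = q')) = p' :: W := by
      simp [List.filter_cons, hpq, hxW]
    rw [h1, h2]
  have hcur' : pvCur (val.set p' s) (alive.set q' false)
      = U.map (fun i => val.getD i 0) ++ s :: W.map (fun i => val.getD i 0) := by
    unfold pvCur
    rw [hAlive', List.map_append, List.map_cons, hset_p]
    congr 1
    · apply List.map_congr_left
      intro a ha
      exact hset_ne a (fun hc => hpU (hc ▸ ha))
    · congr 1
      apply List.map_congr_left
      intro a ha
      exact hset_ne a (fun hc => hpW (hc ▸ ha))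
  have hresEq : pvRes (pvCur val alive) (s, (j : Int))
      = U.map (fun i => val.getD i 0) ++ s :: W.map (fun i => val.getD i 0) := by
    unfold pvRes
    have hj2 : ((j : Int) + 2) = ((j + 2 : Nat) : Int) := by push_cast; ring
    dsimp only
    rw [hj2, PySem.List.slice_to_natCast, PySem.List.slice_from_natCast]
    have ht : (pvCur val alive).take j = U.map (fun i => val.getD i 0) := by
      unfold pvCur
      rw [← List.map_take, hU]
    have hddd : (pvCur val alive).drop (j + 2) = W.map (fun i => val.getD i 0) := by
      unfold pvCur
      rw [← List.map_drop, hW]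
    rw [ht, hddd]
    simp
  -- the agenda: rest is adj minus its head
  have hadjnd : (pvAdj val alive).Nodup := by
    rw [List.nodup_iff_getElem?_ne_getElem?]
    intro a b hab hb
    rw [List.getElem?_eq_getElem (by omega), List.getElem?_eq_getElem hb]
    intro hc
    simp only [Option.some_inj] at hc
    rw [hadjlen] at hb
    rw [hadjgetD a (by omega), hadjgetD b (by omega)] at hc
    simp only [Prod.mk.injEq] at hc
    have := hmono a b hab (by omega)
    have := hc.2.1
    omega
  have hrestperm : rest.Perm ((pvAdj val alive).erase (s, (p' : Int), (q' : Int))) := by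
    have h1 : (pvAdj val alive).Perm
        ((s, (p' : Int), (q' : Int)) :: (pvAdj val alive).erase (s, (p' : Int), (q' : Int))) :=
      List.perm_cons_erase hhd
    exact (hperm.trans h1).cons_inv
  have hfiltP : ∀ g : pvT → Bool, (rest.filter g).Perm
      ((pvAdj val alive).filter
        (fun e => (!decide (e = (s, (p' : Int), (q' : Int)))) && g e)) := by
    intro g
    have h2 := hrestperm.filter g
    rw [hadjnd.erase_eq_filter, List.filter_filter] at h2
    exact h2.trans (by
      apply List.Perm.of_eq
      apply List.filter_congr
      intro e _
      by_cases he : e = (s, (p' : Int), (q' : Int))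
      · subst he; simp
      · simp [he, Bool.and_comm])
  -- entries inside the two untouched zones
  have hA1P : ∀ e ∈ pvMapS val (pvZipAdj U),
      e ≠ (s, (p' : Int), (q' : Int)) ∧ e.2.2 ≠ ((p' : Nat) : Int)
        ∧ e.2.1 ≠ ((q' : Nat) : Int) ∧ e.2.1 ≠ ((p' : Nat) : Int) := by
    intro e he
    obtain ⟨ab, hab, rfl⟩ := pvMapS_mem he
    obtain ⟨h1, h2b⟩ := pvZipAdj_mem hab
    refine ⟨?_, ?_, ?_, ?_⟩
    · intro hc
      simp only [Prod.mk.injEq] at hc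
      exact hpU ((by simpa using hc.2.1 : ab.1 = p') ▸ h1)
    · intro hc
      exact hpU ((by simpa using hc : ab.2 = p') ▸ h2b)
    · intro hc
      exact hqU ((by simpa using hc : ab.1 = q') ▸ h1)
    · intro hc
      exact hpU ((by simpa using hc : ab.1 = p') ▸ h1)
  have hA2P : ∀ e ∈ pvMapS val (pvZipAdj W),
      e ≠ (s, (p' : Int), (q' : Int)) ∧ e.2.2 ≠ ((p' : Nat) : Int)
        ∧ e.2.1 ≠ ((q' : Nat) : Int) ∧ e.2.1 ≠ ((p' : Nat) : Int)
        ∧ ∀ x ∈ U, e.2.1 ≠ ((x : Nat) : Int) := by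
    intro e he
    obtain ⟨ab, hab, rfl⟩ := pvMapS_mem he
    obtain ⟨h1, h2b⟩ := pvZipAdj_mem hab
    refine ⟨?_, ?_, ?_, ?_, ?_⟩
    · intro hc
      simp only [Prod.mk.injEq] at hc
      exact hpW ((by simpa using hc.2.1 : ab.1 = p') ▸ h1)
    · intro hc
      exact hpW ((by simpa using hc : ab.2 = p') ▸ h2b)
    · intro hc
      exact hqW ((by simpa using hc : ab.1 = q') ▸ h1)
    · intro hc
      exact hpW ((by simpa using hc : ab.1 = p') ▸ h1)
    · intro x hx hc
      exact hdisj x hx (by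
        have : ab.1 = x := by simpa using hc
        exact List.mem_cons_of_mem _ (List.mem_cons_of_mem _ ((this ▸ h1) : x ∈ W)))
  -- filters on the untouched zones
  have hA1K : (pvMapS val (pvZipAdj U)).filter
      (fun e => (!decide (e = (s, (p' : Int), (q' : Int))))
        && (!decide (e.2.2 = ((p' : Nat) : Int)) && !decide (e.2.1 = ((q' : Nat) : Int))))
      = pvMapS val (pvZipAdj U) :=
    List.filter_eq_self.2 (fun e he => by
      obtain ⟨x1, x2, x3, _⟩ := hA1P e he
      simp [x1, x2, x3])
  have hA2K : (pvMapS val (pvZipAdj W)).filter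
      (fun e => (!decide (e = (s, (p' : Int), (q' : Int))))
        && (!decide (e.2.2 = ((p' : Nat) : Int)) && !decide (e.2.1 = ((q' : Nat) : Int))))
      = pvMapS val (pvZipAdj W) :=
    List.filter_eq_self.2 (fun e he => by
      obtain ⟨x1, x2, x3, _, _⟩ := hA2P e he
      simp [x1, x2, x3])
  have hA1L : (pvMapS val (pvZipAdj U)).filter
      (fun e => (!decide (e = (s, (p' : Int), (q' : Int))))
        && decide (e.2.2 = ((p' : Nat) : Int))) = [] :=
    List.filter_eq_nil_iff.2 (fun e he => by
      obtain ⟨x1, x2, _, _⟩ := hA1P e he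
      simp [x1, x2])
  have hA2L : (pvMapS val (pvZipAdj W)).filter
      (fun e => (!decide (e = (s, (p' : Int), (q' : Int))))
        && decide (e.2.2 = ((p' : Nat) : Int))) = [] :=
    List.filter_eq_nil_iff.2 (fun e he => by
      obtain ⟨x1, x2, _, _, _⟩ := hA2P e he
      simp [x1, x2])
  have hA1R : (pvMapS val (pvZipAdj U)).filter
      (fun e => (!decide (e = (s, (p' : Int), (q' : Int))))
        && (!decide (e.2.2 = ((p' : Nat) : Int)) && decide (e.2.1 = ((q' : Nat) : Int)))) = [] :=
    List.filter_eq_nil_iff.2 (fun e he => by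
      obtain ⟨x1, _, x3, _⟩ := hA1P e he
      simp [x1, x3])
  have hA2R : (pvMapS val (pvZipAdj W)).filter
      (fun e => (!decide (e = (s, (p' : Int), (q' : Int))))
        && (!decide (e.2.2 = ((p' : Nat) : Int)) && decide (e.2.1 = ((q' : Nat) : Int)))) = [] :=
    List.filter_eq_nil_iff.2 (fun e he => by
      obtain ⟨x1, _, x3, _, _⟩ := hA2P e he
      simp [x1, x3])
  have hrpw : rest.Pairwise pvKLt := (List.pairwise_cons.1 hpw).2
  have hfinish : ∀ AG2 : List pvT,
      pvStepB (val, alive, (s, (p' : Int), (q' : Int)) :: rest)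
        = (val.set p' s, alive.set q' false, AG2) →
      AG2.Perm (pvAdj (val.set p' s) (alive.set q' false)) →
      AG2.Pairwise pvKLt →
      pvInv (pvStepB (val, alive, (s, (p' : Int), (q' : Int)) :: rest)).1
          (pvStepB (val, alive, (s, (p' : Int), (q' : Int)) :: rest)).2.1
          (pvStepB (val, alive, (s, (p' : Int), (q' : Int)) :: rest)).2.2 ∧
        pvCur (pvStepB (val, alive, (s, (p' : Int), (q' : Int)) :: rest)).1
            (pvStepB (val, alive, (s, (p' : Int), (q' : Int)) :: rest)).2.1
          = pvRes (pvCur val alive) (pvFam (pvQ (pvCur val alive))) := by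
    intro AG2 hstep hperm2 hpw2
    rw [hstep]
    refine ⟨⟨by simp [hlen], hperm2, hpw2⟩, ?_⟩
    rw [hfam]
    dsimp only
    rw [hcur', hresEq]
  rcases List.eq_nil_or_concat U with hUc | ⟨U₀, u, hUc⟩
  · subst hUc
    cases W with
    | nil =>
      -- no left and no right neighbour: the whole list is [p', q']
      have hadjdec : pvAdj val alive = [(s, (p' : Int), (q' : Int))] := by
        unfold pvAdj
        rw [hIdec]
        simp only [List.nil_append]
        rw [pvZipAdj_cons₂, pvMapS_cons]
        dsimp only
        rw [hs]
        simp [pvZipAdj, pvMapS]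
      have hrest : rest = [] := by
        have h := hrestperm
        rw [hadjdec] at h
        simpa using h
      subst hrest
      apply hfinish []
      · simp [pvStepB, Int.toNat_natCast]
      · have : pvAdj (val.set p' s) (alive.set q' false) = [] := by
          unfold pvAdj
          rw [hAlive']
          simp [pvZipAdj, pvMapS]
        rw [this]
      · simp
    | cons r' W' =>
      -- no left neighbour; right neighbour r'
      have hrp : r' ≠ p' := fun hc => hpW (by simp [hc])
      have hvr : (val.set p' s).getD r' 0 = val.getD r' 0 := hset_ne r' hrp
      have hadjdec : pvAdj val alive
          = (s, (p' : Int), (q' : Int))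
            :: (val.getD q' 0 + val.getD r' 0, (q' : Int), (r' : Int))
            :: pvMapS val (pvZipAdj (r' :: W')) := by
        unfold pvAdj
        rw [hIdec]
        simp only [List.nil_append]
        rw [pvZipAdj_cons₂, pvZipAdj_cons₂, pvMapS_cons, pvMapS_cons]
        dsimp only
        rw [hs]
      have hRne : (val.getD q' 0 + val.getD r' 0, (q' : Int), (r' : Int))
          ≠ (s, (p' : Int), (q' : Int)) := by
        intro hc
        simp only [Prod.mk.injEq] at hc
        exact hpq (by exact_mod_cast hc.2.1.symm)
      have hLv : rest.filter (fun e => decide (e.2.2 = ((p' : Nat) : Int))) = [] := by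
        have h := hfiltP (fun e => decide (e.2.2 = ((p' : Nat) : Int)))
        have hcomp : ((pvAdj val alive).filter
            (fun e => (!decide (e = (s, (p' : Int), (q' : Int))))
              && decide (e.2.2 = ((p' : Nat) : Int)))) = [] := by
          rw [hadjdec, List.filter_cons, List.filter_cons, hA2L]
          simp [hrp]
        rw [hcomp] at h
        exact h.eq_nil
      have hRv : rest.filter (fun e => !decide (e.2.2 = ((p' : Nat) : Int))
          && decide (e.2.1 = ((q' : Nat) : Int)))
          = [(val.getD q' 0 + val.getD r' 0, (q' : Int), (r' : Int))] := by
        have h := hfiltP (fun e => !decide (e.2.2 = ((p' : Nat) : Int))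
          && decide (e.2.1 = ((q' : Nat) : Int)))
        have hcomp : ((pvAdj val alive).filter
            (fun e => (!decide (e = (s, (p' : Int), (q' : Int))))
              && (!decide (e.2.2 = ((p' : Nat) : Int))
                && decide (e.2.1 = ((q' : Nat) : Int)))))
            = [(val.getD q' 0 + val.getD r' 0, (q' : Int), (r' : Int))] := by
          rw [hadjdec, List.filter_cons, List.filter_cons, hA2R]
          simp [hRne, hrp]
          exact fun _ h _ => hpq h.symm
        rw [hcomp] at h
        exact List.perm_singleton.1 h
      have hrest2perm : (rest.filter (fun e => !decide (e.2.2 = ((p' : Nat) : Int))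
          && !decide (e.2.1 = ((q' : Nat) : Int)))).Perm
          (pvMapS val (pvZipAdj (r' :: W'))) := by
        have h := hfiltP (fun e => !decide (e.2.2 = ((p' : Nat) : Int))
          && !decide (e.2.1 = ((q' : Nat) : Int)))
        have hcomp : ((pvAdj val alive).filter
            (fun e => (!decide (e = (s, (p' : Int), (q' : Int))))
              && (!decide (e.2.2 = ((p' : Nat) : Int))
                && !decide (e.2.1 = ((q' : Nat) : Int)))))
            = pvMapS val (pvZipAdj (r' :: W')) := by
          rw [hadjdec, List.filter_cons, List.filter_cons, hA2K]
          simp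
        rw [hcomp] at h
        exact h
      have hstep : pvStepB (val, alive, (s, (p' : Int), (q' : Int)) :: rest)
          = (val.set p' s, alive.set q' false,
             pvInsort (rest.filter (fun e => !decide (e.2.2 = ((p' : Nat) : Int))
               && !decide (e.2.1 = ((q' : Nat) : Int))))
               (s + val.getD r' 0, (p' : Int), (r' : Int))) := by
        simp only [pvStepB]
        rw [pvScan1 ((p' : Nat) : Int) ((q' : Nat) : Int) rest none none [],
            pvScan2 ((p' : Nat) : Int) ((q' : Nat) : Int) rest none none [],
            pvScan3 ((p' : Nat) : Int) ((q' : Nat) : Int) rest none none [],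
            hLv, hRv]
        have hset_p2 : (val.set p' s)[p']?.getD 0 = s := by
          rw [← List.getD_eq_getElem?_getD]; exact hset_p
        have hvr2 : (val.set p' s)[r']?.getD 0 = val[r']?.getD 0 := by
          rw [← List.getD_eq_getElem?_getD, ← List.getD_eq_getElem?_getD]; exact hvr
        simp [PySem.List.pyGetD_natCast, hset_p2, hvr2]
      have hadj' : pvAdj (val.set p' s) (alive.set q' false)
          = (s + val.getD r' 0, (p' : Int), (r' : Int)) :: pvMapS val (pvZipAdj (r' :: W')) := by
        unfold pvAdj
        rw [hAlive']
        simp only [List.nil_append]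
        rw [pvZipAdj_cons₂, pvMapS_cons]
        dsimp only
        rw [hset_p, hvr]
        congr 1
        apply pvMapS_congr
        intro ab hab
        obtain ⟨hm1, hm2⟩ := pvZipAdj_mem hab
        exact ⟨hset_ne _ (fun hc => hpW (hc ▸ hm1)), hset_ne _ (fun hc => hpW (hc ▸ hm2))⟩
      apply hfinish _ hstep
      · rw [hadj']
        exact (pvInsort_perm _ _).trans (hrest2perm.cons _)
      · apply pvInsort_pairwise _ _ (hrpw.filter _)
        intro y hy
        exact (hA2P y (hrest2perm.mem_iff.1 hy)).2.2.2.1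
  · rw [List.concat_eq_append] at hUc
    subst hUc
    have hup : u ≠ p' := fun hc => hpU (by simp [hc])
    have hu0 : u ∉ U₀ := by
      intro hc
      have h := hndU
      simp [List.nodup_append] at h
      tauto
    have hvu : (val.set p' s).getD u 0 = val.getD u 0 := hset_ne u hup
    have hLne : (val.getD u 0 + val.getD p' 0, (u : Int), (p' : Int))
        ≠ (s, (p' : Int), (q' : Int)) := by
      intro hc
      simp only [Prod.mk.injEq] at hc
      exact hup (by exact_mod_cast hc.2.1)
    have hA1left : ∀ y ∈ pvMapS val (pvZipAdj (U₀ ++ [u])), y.2.1 ≠ ((u : Nat) : Int) := by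
      intro y hy
      obtain ⟨ab, hab, rfl⟩ := pvMapS_mem hy
      have hm := pvZipAdj_concat_left_mem hab
      intro hc
      exact hu0 (((by simpa using hc : ab.1 = u)) ▸ hm)
    have hset_p2 : (val.set p' s)[p']?.getD 0 = s := by
      rw [← List.getD_eq_getElem?_getD]; exact hset_p
    have hvu2 : (val.set p' s)[u]?.getD 0 = val[u]?.getD 0 := by
      rw [← List.getD_eq_getElem?_getD, ← List.getD_eq_getElem?_getD]; exact hvu
    cases W with
    | nil =>
      -- left neighbour u; no right neighbour
      have hadjdec : pvAdj val alive
          = pvMapS val (pvZipAdj (U₀ ++ [u]))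
            ++ [(val.getD u 0 + val.getD p' 0, (u : Int), (p' : Int))]
            ++ [(s, (p' : Int), (q' : Int))] := by
        unfold pvAdj
        rw [hIdec, pvZipAdj_append (U₀ ++ [u]) p' [q'], pvZipAdj_snoc U₀ u p',
          pvMapS_append, pvMapS_append]
        dsimp only [pvMapS, pvZipAdj, List.zip_nil_right]
        simp [hs2]
      have hLv : rest.filter (fun e => decide (e.2.2 = ((p' : Nat) : Int)))
          = [(val.getD u 0 + val.getD p' 0, (u : Int), (p' : Int))] := by
        have h := hfiltP (fun e => decide (e.2.2 = ((p' : Nat) : Int)))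
        have hcomp : ((pvAdj val alive).filter
            (fun e => (!decide (e = (s, (p' : Int), (q' : Int))))
              && decide (e.2.2 = ((p' : Nat) : Int))))
            = [(val.getD u 0 + val.getD p' 0, (u : Int), (p' : Int))] := by
          rw [hadjdec, List.filter_append, List.filter_append, hA1L]
          simp [hLne]
          exact fun _ h _ => hup h
        rw [hcomp] at h
        exact List.perm_singleton.1 h
      have hRv : rest.filter (fun e => !decide (e.2.2 = ((p' : Nat) : Int))
          && decide (e.2.1 = ((q' : Nat) : Int))) = [] := by
        have h := hfiltP (fun e => !decide (e.2.2 = ((p' : Nat) : Int))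
          && decide (e.2.1 = ((q' : Nat) : Int)))
        have hcomp : ((pvAdj val alive).filter
            (fun e => (!decide (e = (s, (p' : Int), (q' : Int))))
              && (!decide (e.2.2 = ((p' : Nat) : Int))
                && decide (e.2.1 = ((q' : Nat) : Int))))) = [] := by
          rw [hadjdec, List.filter_append, List.filter_append, hA1R]
          simp
        rw [hcomp] at h
        exact h.eq_nil
      have hrest2perm : (rest.filter (fun e => !decide (e.2.2 = ((p' : Nat) : Int))
          && !decide (e.2.1 = ((q' : Nat) : Int)))).Perm
          (pvMapS val (pvZipAdj (U₀ ++ [u]))) := by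
        have h := hfiltP (fun e => !decide (e.2.2 = ((p' : Nat) : Int))
          && !decide (e.2.1 = ((q' : Nat) : Int)))
        have hcomp : ((pvAdj val alive).filter
            (fun e => (!decide (e = (s, (p' : Int), (q' : Int))))
              && (!decide (e.2.2 = ((p' : Nat) : Int))
                && !decide (e.2.1 = ((q' : Nat) : Int)))))
            = pvMapS val (pvZipAdj (U₀ ++ [u])) := by
          rw [hadjdec, List.filter_append, List.filter_append, hA1K]
          simp
        rw [hcomp] at h
        exact h
      have hstep : pvStepB (val, alive, (s, (p' : Int), (q' : Int)) :: rest)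
          = (val.set p' s, alive.set q' false,
             pvInsort (rest.filter (fun e => !decide (e.2.2 = ((p' : Nat) : Int))
               && !decide (e.2.1 = ((q' : Nat) : Int))))
               (val.getD u 0 + s, (u : Int), (p' : Int))) := by
        simp only [pvStepB]
        rw [pvScan1 ((p' : Nat) : Int) ((q' : Nat) : Int) rest none none [],
            pvScan2 ((p' : Nat) : Int) ((q' : Nat) : Int) rest none none [],
            pvScan3 ((p' : Nat) : Int) ((q' : Nat) : Int) rest none none [],
            hLv, hRv]
        simp [PySem.List.pyGetD_natCast, hset_p2, hvu2]
      have hadj' : pvAdj (val.set p' s) (alive.set q' false)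
          = pvMapS val (pvZipAdj (U₀ ++ [u]))
            ++ [(val.getD u 0 + s, (u : Int), (p' : Int))] := by
        unfold pvAdj
        rw [hAlive', pvZipAdj_snoc U₀ u p', pvMapS_append]
        congr 1
        · apply pvMapS_congr
          intro ab hab
          obtain ⟨hm1, hm2⟩ := pvZipAdj_mem hab
          exact ⟨hset_ne _ (fun hc => hpU (hc ▸ hm1)), hset_ne _ (fun hc => hpU (hc ▸ hm2))⟩
        · dsimp only [pvMapS, List.map]
          rw [hvu, hset_p]
      apply hfinish _ hstep
      · rw [hadj']
        exact ((pvInsort_perm _ _).trans (hrest2perm.cons _)).trans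
          (List.perm_append_singleton _ _).symm
      · apply pvInsort_pairwise _ _ (hrpw.filter _)
        intro y hy
        exact hA1left y (hrest2perm.mem_iff.1 hy)
    | cons r' W' =>
      -- left neighbour u and right neighbour r'
      have hrp : r' ≠ p' := fun hc => hpW (by simp [hc])
      have hvr : (val.set p' s).getD r' 0 = val.getD r' 0 := hset_ne r' hrp
      have hvr2 : (val.set p' s)[r']?.getD 0 = val[r']?.getD 0 := by
        rw [← List.getD_eq_getElem?_getD, ← List.getD_eq_getElem?_getD]; exact hvr
      have hRne : (val.getD q' 0 + val.getD r' 0, (q' : Int), (r' : Int))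
          ≠ (s, (p' : Int), (q' : Int)) := by
        intro hc
        simp only [Prod.mk.injEq] at hc
        exact hpq (by exact_mod_cast hc.2.1.symm)
      have hadjdec : pvAdj val alive
          = pvMapS val (pvZipAdj (U₀ ++ [u]))
            ++ [(val.getD u 0 + val.getD p' 0, (u : Int), (p' : Int))]
            ++ ((s, (p' : Int), (q' : Int))
                :: (val.getD q' 0 + val.getD r' 0, (q' : Int), (r' : Int))
                :: pvMapS val (pvZipAdj (r' :: W'))) := by
        unfold pvAdj
        rw [hIdec, pvZipAdj_append (U₀ ++ [u]) p' (q' :: r' :: W'), pvZipAdj_snoc U₀ u p',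
          pvZipAdj_cons₂ p' q' (r' :: W'), pvZipAdj_cons₂ q' r' W',
          pvMapS_append, pvMapS_append, pvMapS_cons, pvMapS_cons]
        dsimp only
        rw [hs]
        simp [pvMapS_cons, pvMapS]
      have hLv : rest.filter (fun e => decide (e.2.2 = ((p' : Nat) : Int)))
          = [(val.getD u 0 + val.getD p' 0, (u : Int), (p' : Int))] := by
        have h := hfiltP (fun e => decide (e.2.2 = ((p' : Nat) : Int)))
        have hcomp : ((pvAdj val alive).filter
            (fun e => (!decide (e = (s, (p' : Int), (q' : Int))))
              && decide (e.2.2 = ((p' : Nat) : Int))))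
            = [(val.getD u 0 + val.getD p' 0, (u : Int), (p' : Int))] := by
          rw [hadjdec, List.filter_append, List.filter_append, hA1L]
          simp [List.filter_cons, hA2L, hLne, hrp]
          exact fun _ h _ => hup h
        rw [hcomp] at h
        exact List.perm_singleton.1 h
      have hRv : rest.filter (fun e => !decide (e.2.2 = ((p' : Nat) : Int))
          && decide (e.2.1 = ((q' : Nat) : Int)))
          = [(val.getD q' 0 + val.getD r' 0, (q' : Int), (r' : Int))] := by
        have h := hfiltP (fun e => !decide (e.2.2 = ((p' : Nat) : Int))
          && decide (e.2.1 = ((q' : Nat) : Int)))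
        have hcomp : ((pvAdj val alive).filter
            (fun e => (!decide (e = (s, (p' : Int), (q' : Int))))
              && (!decide (e.2.2 = ((p' : Nat) : Int))
                && decide (e.2.1 = ((q' : Nat) : Int)))))
            = [(val.getD q' 0 + val.getD r' 0, (q' : Int), (r' : Int))] := by
          rw [hadjdec, List.filter_append, List.filter_append, hA1R]
          simp [List.filter_cons, hA2R, hRne, hrp]
          exact fun _ h _ => hpq h.symm
        rw [hcomp] at h
        exact List.perm_singleton.1 h
      have hrest2perm : (rest.filter (fun e => !decide (e.2.2 = ((p' : Nat) : Int))
          && !decide (e.2.1 = ((q' : Nat) : Int)))).Perm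
          (pvMapS val (pvZipAdj (U₀ ++ [u])) ++ pvMapS val (pvZipAdj (r' :: W'))) := by
        have h := hfiltP (fun e => !decide (e.2.2 = ((p' : Nat) : Int))
          && !decide (e.2.1 = ((q' : Nat) : Int)))
        have hcomp : ((pvAdj val alive).filter
            (fun e => (!decide (e = (s, (p' : Int), (q' : Int))))
              && (!decide (e.2.2 = ((p' : Nat) : Int))
                && !decide (e.2.1 = ((q' : Nat) : Int)))))
            = pvMapS val (pvZipAdj (U₀ ++ [u])) ++ pvMapS val (pvZipAdj (r' :: W')) := by
          rw [hadjdec, List.filter_append, List.filter_append, hA1K]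
          simp [List.filter_cons, hA2K]
        rw [hcomp] at h
        exact h
      have hstep : pvStepB (val, alive, (s, (p' : Int), (q' : Int)) :: rest)
          = (val.set p' s, alive.set q' false,
             pvInsort
               (pvInsort (rest.filter (fun e => !decide (e.2.2 = ((p' : Nat) : Int))
                   && !decide (e.2.1 = ((q' : Nat) : Int))))
                 (val.getD u 0 + s, (u : Int), (p' : Int)))
               (s + val.getD r' 0, (p' : Int), (r' : Int))) := by
        simp only [pvStepB]
        rw [pvScan1 ((p' : Nat) : Int) ((q' : Nat) : Int) rest none none [],
            pvScan2 ((p' : Nat) : Int) ((q' : Nat) : Int) rest none none [],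
            pvScan3 ((p' : Nat) : Int) ((q' : Nat) : Int) rest none none [],
            hLv, hRv]
        simp [PySem.List.pyGetD_natCast, hset_p2, hvu2, hvr2]
      have hadj' : pvAdj (val.set p' s) (alive.set q' false)
          = pvMapS val (pvZipAdj (U₀ ++ [u]))
            ++ ((val.getD u 0 + s, (u : Int), (p' : Int))
              :: (s + val.getD r' 0, (p' : Int), (r' : Int))
              :: pvMapS val (pvZipAdj (r' :: W'))) := by
        unfold pvAdj
        rw [hAlive', pvZipAdj_append (U₀ ++ [u]) p' (r' :: W'), pvZipAdj_snoc U₀ u p',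
          pvZipAdj_cons₂ p' r' W', pvMapS_append, pvMapS_append, pvMapS_cons, pvMapS_cons]
        dsimp only
        rw [hvu, hset_p, hvr]
        have hA1c : pvMapS (val.set p' s) (pvZipAdj (U₀ ++ [u]))
            = pvMapS val (pvZipAdj (U₀ ++ [u])) :=
          pvMapS_congr _ _ _ (fun ab hab => by
            obtain ⟨hm1, hm2⟩ := pvZipAdj_mem hab
            exact ⟨hset_ne _ (fun hc => hpU (hc ▸ hm1)), hset_ne _ (fun hc => hpU (hc ▸ hm2))⟩)
        have hA2c : pvMapS (val.set p' s) (pvZipAdj (r' :: W'))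
            = pvMapS val (pvZipAdj (r' :: W')) :=
          pvMapS_congr _ _ _ (fun ab hab => by
            obtain ⟨hm1, hm2⟩ := pvZipAdj_mem hab
            exact ⟨hset_ne _ (fun hc => hpW (hc ▸ hm1)), hset_ne _ (fun hc => hpW (hc ▸ hm2))⟩)
        rw [hA1c, hA2c]
        simp [pvMapS]
      apply hfinish _ hstep
      · rw [hadj']
        refine ((pvInsort_perm _ _).trans (((pvInsort_perm _ _).trans
          (hrest2perm.cons _)).cons _)).trans ?_
        refine (List.Perm.swap _ _ _).trans ?_
        refine (List.Perm.cons _ List.perm_middle.symm).trans ?_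
        exact List.perm_middle.symm
      · apply pvInsort_pairwise
        · apply pvInsort_pairwise _ _ (hrpw.filter _)
          intro y hy
          rcases List.mem_append.1 (hrest2perm.mem_iff.1 hy) with h | h
          · exact hA1left y h
          · exact (hA2P y h).2.2.2.2 u (by simp)
        · intro y hy
          rcases List.mem_cons.1 ((pvInsort_perm _ _).mem_iff.1 hy) with h | h
          · subst h
            intro hc
            exact hup (by simpa using hc)
          · rcases List.mem_append.1 (hrest2perm.mem_iff.1 h) with h2 | h2
            · exact (hA1P y h2).2.2.2
            · exact (hA2P y h2).2.2.2.1


-- driving both loops in lockstep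
theorem pvSim (k : Nat) : ∀ (f : Nat) (target : Int) (val : List Int) (alive : List Bool)
    (ag : List pvT), pvInv val alive ag → 1 ≤ target →
    ((pvCur val alive).length : Int) = target + k → k ≤ f →
    pvLoopA f target (pvCur val alive)
      = pvCur ((List.range k).foldl (fun st _ => pvStepB st) (val, alive, ag)).1
          ((List.range k).foldl (fun st _ => pvStepB st) (val, alive, ag)).2.1
    ∧ pvInv ((List.range k).foldl (fun st _ => pvStepB st) (val, alive, ag)).1
        ((List.range k).foldl (fun st _ => pvStepB st) (val, alive, ag)).2.1
        ((List.range k).foldl (fun st _ => pvStepB st) (val, alive, ag)).2.2 := by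
  induction k with
  | zero =>
    intro f target val alive ag hinv ht hlen hf
    simp only [List.range_zero, List.foldl_nil]
    refine ⟨?_, hinv⟩
    cases f with
    | zero => simp [pvLoopA]
    | succ f =>
      simp only [pvLoopA]
      rw [if_neg (by omega)]
  | succ k ih =>
    intro f target val alive ag hinv ht hlen hf
    cases f with
    | zero => omega
    | succ f =>
      have h2 : 2 ≤ (pvCur val alive).length := by omega
      obtain ⟨hinv', hcur'⟩ := pvStepB_sim val alive ag hinv h2
      have hl2 : (pvCur (pvStepB (val, alive, ag)).1 (pvStepB (val, alive, ag)).2.1).length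
          = (pvCur val alive).length - 1 := by
        rw [hcur']; exact pvResFam_length _ h2
      have hfold : (List.range (k + 1)).foldl (fun st _ => pvStepB st) (val, alive, ag)
          = (List.range k).foldl (fun st _ => pvStepB st) (pvStepB (val, alive, ag)) :=
        pvFoldRangeSucc pvStepB k (val, alive, ag)
      have hIH := ih f target (pvStepB (val, alive, ag)).1 (pvStepB (val, alive, ag)).2.1
        (pvStepB (val, alive, ag)).2.2 hinv' ht (by omega) (by omega)
      rw [hfold]
      simp only [pvLoopA]
      rw [if_pos (by omega)]
      rw [pvMergeA_eq_res _ h2, ← hcur']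
      exact hIH

theorem pvInv_init (supplies : List Int) :
    pvInv supplies (List.replicate supplies.length true)
      (PySem.List.sorted2
        ((List.range (supplies.length - 1)).map
          (fun i => ((supplies.getD i 0 + supplies.getD (i + 1) 0, (i : Int), (i : Int) + 1) : pvT)))
        (fun e => e.1) (fun e => e.2.1)) := by
  set n := supplies.length with hn
  set ents := (List.range (n - 1)).map
    (fun i => ((supplies.getD i 0 + supplies.getD (i + 1) 0, (i : Int), (i : Int) + 1) : pvT))
    with hents
  have hAdj : pvAdj supplies (List.replicate n true) = ents := by
    unfold pvAdj pvMapS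
    rw [pvAliveIdx_replicate]
    apply List.ext_getElem
    · simp [pvZipAdj_length, hents]
    · intro i h1 h2
      have hi : i < n - 1 := by
        simpa [pvZipAdj_length] using (by simpa using h1 : i < (pvZipAdj (List.range n)).length)
      simp only [List.getElem_map, hents]
      have hz : (pvZipAdj (List.range n))[i]'(by rw [pvZipAdj_length]; simpa using hi) = (i, i + 1) := by
        rw [pvZipAdj_getElem (List.range n) i (by simp; omega)]
        simp
      rw [hz]
      simp [List.getElem_range]
  refine ⟨by simp [hn], ?_, ?_⟩
  · exact (PySem.List.sorted2_perm ents _ _ false).trans (hAdj ▸ List.Perm.refl _)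
  · apply pvSorted2_pairwise
    rw [hents]
    rw [List.pairwise_map]
    apply List.Pairwise.imp ?_ List.pairwise_lt_range
    intro a b hab
    simp only [ne_eq, Int.natCast_inj]
    omega

theorem pvCur_init (supplies : List Int) :
    pvCur supplies (List.replicate supplies.length true) = supplies := by
  unfold pvCur
  rw [pvAliveIdx_replicate]
  apply List.ext_getElem
  · simp
  · intro i h1 h2
    simp [List.getD_eq_getElem, h2]

-- ===== VERDICT (by name: the statement is the Claim_ definition above) =====
theorem supplyWagon_spec : Claim_equal_supplyWagon := by
  intro s _ hpre
  unfold Spec_supplyWagon Pre_supplyWagon at *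
  by_cases h0 : s.length = 0
  · have : s = [] := List.length_eq_zero_iff.1 h0
    subst this
    decide
  · have h2 : 2 ≤ s.length := by omega
    have hinv := pvInv_init s
    have hcur := pvCur_init s
    have htarget : PySem.Int.floordiv (s.length : Int) 2 = ((s.length / 2 : Nat) : Int) := by
      exact_mod_cast PySem.Int.floordiv_natCast s.length 2
    obtain ⟨heq, hfin⟩ := pvSim (s.length - s.length / 2) s.length ((s.length / 2 : Nat) : Int)
      s (List.replicate s.length true) _ hinv (by omega)
      (by rw [hcur]; push_cast; omega) (by omega)
    unfold supplyWagon supplyWagon_alt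
    rw [htarget]
    simp only []
    rw [hcur] at heq
    rw [heq, pvCur_zipfilter _ _ hfin.1]
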